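-- pv_equiv track=rewrite | github.com/ashleyhma/hb-challenges | other/password.py | possible_passwords
-- ===== SOURCE A (Python) =====
-- def possible_passwords(corrupted, possible):
--     result = []
--
--     letter_dict = {}
--     for idx, ch in enumerate(corrupted):
--         if ch.isalpha():
--             letter_dict[idx] = ch
--
--     poss_str = ''
--     for word in possible:
--         if len(corrupted) == len(word):
--             for idx, ch in enumerate(word):
--                 if idx not in letter_dict:
--                     poss_str += ch
--                 if idx in letter_dict:
--                     if ch == letter_dict[idx]:
--                         poss_str += ch
--             if len(poss_str) == len(corrupted):
--                 result.append(word)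
--             poss_str = ''
--
--     return result
-- ===== SOURCE B (Python) =====
-- def possible_passwords(corrupted, possible):
--     # Sieve: start with the same-length words, then make one stable filtering
--     # pass per fixed (alphabetic) position of the pattern.
--     survivors = [w for w in possible if len(w) == len(corrupted)]
--     for i, c in enumerate(corrupted):
--         if c.isalpha():
--             survivors = [w for w in survivors if w[i] == c]
--     return survivors
-- ===== Notes on version B (the rewrite author's own statement) =====
-- stated objective: alternative
-- what changed: Loop interchange: instead of scanning every character of every word and rebuilding a throwaway string per word, B keeps a list of surviving candidates and refines it with one stable filtering pass per fixed alphabetic position of the pattern (after a length pre-filter).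
import Mathlib
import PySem

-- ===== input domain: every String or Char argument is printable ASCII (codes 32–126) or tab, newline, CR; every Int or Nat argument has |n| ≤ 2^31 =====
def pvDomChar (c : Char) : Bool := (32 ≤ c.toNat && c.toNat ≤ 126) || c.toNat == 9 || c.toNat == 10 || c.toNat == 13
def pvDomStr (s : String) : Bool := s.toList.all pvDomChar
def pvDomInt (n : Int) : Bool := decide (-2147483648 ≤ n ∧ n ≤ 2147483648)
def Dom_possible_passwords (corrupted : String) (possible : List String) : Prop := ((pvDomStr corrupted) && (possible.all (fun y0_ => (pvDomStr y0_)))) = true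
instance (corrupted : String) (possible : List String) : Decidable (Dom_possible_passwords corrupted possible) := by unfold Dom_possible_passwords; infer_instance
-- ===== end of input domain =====

-- B reorganises the computation by loop interchange: instead of scanning every
-- character of every word and rebuilding a throwaway string per word, it keeps a
-- list of surviving candidates and refines it with one stable filtering pass per
-- fixed alphabetic position of the pattern; same return value on every input.

-- ===== PORT A =====
-- the dict of alphabetic fixed positions, as A builds it
def pvBuildDict (cs : List Char) : PySem.Dict Int Char :=
  (PySem.List.enumerate cs).foldl
    (fun d p => if PySem.Chars.isalpha p.2 then d.insert p.1 p.2 else d)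
    PySem.Dict.empty

-- A's inner loop body: append ch when idx is not a fixed position, or when it matches
def pvInnerStep (d : PySem.Dict Int Char) (acc : List Char) (p : Int × Char) : List Char :=
  let acc := if d.contains p.1 = false then acc ++ [p.2] else acc
  if d.contains p.1 then
    (if p.2 = d.getD p.1 p.2 then acc ++ [p.2] else acc)
  else acc

def possible_passwords (corrupted : String) (possible : List String) : List String :=
  let cs := corrupted.toList
  let letter_dict := pvBuildDict cs
  (possible.foldl
    (fun (st : List String × List Char) word =>
      if cs.length = word.toList.length then
        let poss := (PySem.List.enumerate word.toList).foldl (pvInnerStep letter_dict) st.2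
        if poss.length = cs.length then (st.1 ++ [word], ([] : List Char)) else (st.1, [])
      else st)
    ([], [])).1

-- ===== PORT B =====
def possible_passwords_alt (corrupted : String) (possible : List String) : List String :=
  let cs := corrupted.toList
  let survivors := possible.filter (fun w => w.toList.length == cs.length)
  (PySem.List.enumerate cs).foldl
    (fun surv p =>
      if PySem.Chars.isalpha p.2 then
        surv.filter (fun w => PySem.List.pyGet? w.toList p.1 == some p.2)
      else surv)
    survivors

-- ===== PRECONDITION & SPEC =====
def Spec_possible_passwords (corrupted : String) (possible : List String) (out : List String) : Prop := out = possible_passwords_alt corrupted possible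
instance (corrupted : String) (possible : List String) (out : List String) : Decidable (Spec_possible_passwords corrupted possible out) := by unfold Spec_possible_passwords; infer_instance

-- ===== CLAIM (what is proved, stated in full; the proofs are below) =====
def Claim_equal_possible_passwords : Prop := ∀ (corrupted : String) (possible : List String), Dom_possible_passwords corrupted possible → Spec_possible_passwords corrupted possible (possible_passwords corrupted possible)

-- ===== LEMMAS AND PROOFS =====

-- whether A's inner loop appends the character of pair p
def pvPass (d : PySem.Dict Int Char) (p : Int × Char) : Bool :=
  !d.contains p.1 || decide (p.2 = d.getD p.1 p.2)

set_option maxRecDepth 4000 in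
lemma pvInner_len (d : PySem.Dict Int Char) (ps : List (Int × Char)) (acc : List Char) :
    (ps.foldl (pvInnerStep d) acc).length = acc.length + ps.countP (pvPass d) := by
  induction ps generalizing acc with
  | nil => simp
  | cons p ps ih =>
    cases hc : d.contains p.1 with
    | true =>
      have hstep : pvInnerStep d acc p = if p.2 = d.getD p.1 p.2 then acc ++ [p.2] else acc := by
        simp [pvInnerStep, hc]
      have hpass : pvPass d p = decide (p.2 = d.getD p.1 p.2) := by simp [pvPass, hc]
      rw [List.foldl_cons, List.countP_cons, hstep, hpass, ih]
      by_cases he : p.2 = d.getD p.1 p.2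
      · rw [if_pos he, decide_eq_true he]
        simp [List.length_append]; omega
      · rw [if_neg he, decide_eq_false he]
        simp
    | false =>
      simp [List.foldl_cons, pvInnerStep, pvPass, hc, ih]; omega

lemma pvBuildDict_get? (cs : List Char) (i : Int) :
    (pvBuildDict cs).get? i =
      if h : 0 ≤ i ∧ i.toNat < cs.length then
        (if PySem.Chars.isalpha cs[i.toNat] then some cs[i.toNat] else none)
      else none := by
  induction cs using List.reverseRecOn with
  | nil => simp [pvBuildDict]
  | append_singleton xs x ih =>
    have hb : pvBuildDict (xs ++ [x]) =
        (if PySem.Chars.isalpha x then (pvBuildDict xs).insert (xs.length : Int) x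
         else pvBuildDict xs) := by
      simp [pvBuildDict, PySem.List.enumerate_append, PySem.List.enumerate_cons,
        PySem.List.enumerate_nil, List.foldl_append]
    rw [hb]
    by_cases hi : i = (xs.length : Int)
    · subst hi
      by_cases ha : PySem.Chars.isalpha x
      · rw [if_pos ha, PySem.Dict.get?_insert_self]
        have h2 : (0:Int) ≤ (xs.length : Int) ∧ ((xs.length : Int)).toNat < (xs ++ [x]).length := by
          simp only [List.length_append, List.length_singleton]
          constructor <;> omega
        rw [dif_pos h2]
        simp [ha]
      · rw [if_neg ha, ih]
        have h1 : ¬ ((0:Int) ≤ (xs.length : Int) ∧ ((xs.length : Int)).toNat < xs.length) := by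
          simp
        have h2 : (0:Int) ≤ (xs.length : Int) ∧ ((xs.length : Int)).toNat < (xs ++ [x]).length := by
          simp only [List.length_append, List.length_singleton]
          constructor <;> omega
        rw [dif_neg h1, dif_pos h2]
        simp [ha]
    · have step : (if PySem.Chars.isalpha x then (pvBuildDict xs).insert (xs.length : Int) x
         else pvBuildDict xs).get? i = (pvBuildDict xs).get? i := by
        by_cases ha : PySem.Chars.isalpha x
        · rw [if_pos ha, PySem.Dict.get?_insert_of_ne _ _ hi]
        · rw [if_neg ha]
      rw [step, ih]
      by_cases h : 0 ≤ i ∧ i.toNat < xs.length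
      · have h' : 0 ≤ i ∧ i.toNat < (xs ++ [x]).length := by
          simp only [List.length_append, List.length_singleton]; omega
        rw [dif_pos h, dif_pos h', List.getElem_append_left h.2]
      · have h' : ¬ (0 ≤ i ∧ i.toNat < (xs ++ [x]).length) := by
          simp only [List.length_append, List.length_singleton]
          intro hx
          apply h
          refine ⟨hx.1, ?_⟩
          have : i.toNat ≠ xs.length := by
            intro he
            apply hi
            omega
          omega
        rw [dif_neg h, dif_neg h']

lemma pvPass_at (cs w : List Char) (k : Nat) (hkc : k < cs.length) (hkw : k < w.length) :
    pvPass (pvBuildDict cs) ((k : Int), w[k]) =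
      (!PySem.Chars.isalpha cs[k] || (w[k] == cs[k])) := by
  have hget : (pvBuildDict cs).get? (k : Int) =
      (if PySem.Chars.isalpha cs[k] then some cs[k] else none) := by
    rw [pvBuildDict_get?, dif_pos ⟨by omega, by omega⟩]
    simp
  unfold pvPass
  rw [PySem.Dict.contains_eq_isSome_get?, PySem.Dict.getD_eq_get?_getD, hget]
  by_cases ha : PySem.Chars.isalpha cs[k]
  · simp only [ha, if_true, Option.isSome_some, Bool.not_true, Bool.false_or, Option.getD_some]
    by_cases h : w[k] = cs[k] <;> simp [h]
  · simp [ha]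

lemma pvWord_ok (cs w : List Char) (hl : w.length = cs.length) :
    ((PySem.List.enumerate w).countP (pvPass (pvBuildDict cs)) = cs.length)
      ↔ ((w.zip cs).all (fun p => !PySem.Chars.isalpha p.2 || p.1 == p.2) = true) := by
  have hlen : (PySem.List.enumerate w).length = w.length := PySem.List.length_enumerate ..
  rw [← hl, ← hlen, List.countP_eq_length, List.all_eq_true]
  constructor
  · intro h p hp
    rw [List.mem_iff_getElem] at hp
    obtain ⟨k, hk, hpk⟩ := hp
    have hkw : k < w.length := by
      have := hk; rw [List.length_zip] at this; omega
    have hm : ((k : Int), w[k]) ∈ PySem.List.enumerate w := by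
      rw [List.mem_iff_getElem]
      exact ⟨k, by omega, by simp [PySem.List.getElem_enumerate]⟩
    have := h _ hm
    rw [pvPass_at cs w k (by omega) hkw] at this
    rw [← hpk, List.getElem_zip]
    exact this
  · intro h p hp
    rw [PySem.List.mem_enumerate_iff] at hp
    obtain ⟨k, hk, hpk⟩ := hp
    subst hpk
    simp only [zero_add]
    rw [pvPass_at cs w k (by omega) hk]
    have hz : k < (w.zip cs).length := by rw [List.length_zip]; omega
    have := h ((w.zip cs)[k]) (List.getElem_mem hz)
    rwa [List.getElem_zip] at this

lemma pvMain (cs : List Char) (possible : List String) (res : List String) :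
    ((possible.foldl
      (fun (st : List String × List Char) word =>
        if cs.length = word.toList.length then
          let poss := (PySem.List.enumerate word.toList).foldl (pvInnerStep (pvBuildDict cs)) st.2
          if poss.length = cs.length then (st.1 ++ [word], ([] : List Char)) else (st.1, [])
        else st)
      (res, [])).1)
    = res ++ possible.filter (fun word =>
        word.toList.length == cs.length &&
        (word.toList.zip cs).all (fun p => !PySem.Chars.isalpha p.2 || p.1 == p.2)) := by
  induction possible generalizing res with
  | nil => simp
  | cons w ws ih =>
    simp only [List.foldl_cons, List.filter_cons]
    by_cases hlen : cs.length = w.toList.length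
    · rw [if_pos hlen]
      have hbeq : (w.toList.length == cs.length) = true := beq_iff_eq.mpr hlen.symm
      have hcount := pvInner_len (pvBuildDict cs) (PySem.List.enumerate w.toList) []
      simp only [List.length_nil, Nat.zero_add] at hcount
      by_cases hp : ((PySem.List.enumerate w.toList).foldl (pvInnerStep (pvBuildDict cs)) []).length = cs.length
      · have hall : (w.toList.zip cs).all (fun p => !PySem.Chars.isalpha p.2 || p.1 == p.2) = true := by
          rw [← pvWord_ok cs w.toList hlen.symm, ← hcount]; exact hp
        rw [if_pos hp]
        rw [if_pos (by simp only [hbeq, hall, Bool.and_self])]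
        rw [ih (res ++ [w])]
        simp
      · have hall : ¬ ((w.toList.zip cs).all (fun p => !PySem.Chars.isalpha p.2 || p.1 == p.2) = true) := by
          rw [← pvWord_ok cs w.toList hlen.symm, ← hcount]; exact hp
        rw [if_neg hp]
        rw [if_neg (by intro hcontra; apply hall; rw [hbeq, Bool.true_and] at hcontra; exact hcontra)]
        exact ih res
    · rw [if_neg hlen]
      have hbeq : (w.toList.length == cs.length) = false :=
        beq_eq_false_iff_ne.mpr (fun h => hlen h.symm)
      rw [if_neg (by rw [hbeq, Bool.false_and]; exact Bool.false_ne_true)]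
      exact ih res

-- B's sieve fuses into a single filter by the conjunction over the processed positions
lemma pvSieve (ps : List (Int × Char)) (L : List String) :
    (ps.foldl
      (fun surv p =>
        if PySem.Chars.isalpha p.2 then
          surv.filter (fun w => PySem.List.pyGet? w.toList p.1 == some p.2)
        else surv) L)
    = L.filter (fun w => ps.all (fun p =>
        !PySem.Chars.isalpha p.2 || (PySem.List.pyGet? w.toList p.1 == some p.2))) := by
  induction ps generalizing L with
  | nil => simp
  | cons p ps ih =>
    simp only [List.foldl_cons, List.all_cons]
    by_cases ha : PySem.Chars.isalpha p.2
    · rw [if_pos ha, ih, List.filter_filter]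
      apply List.filter_congr
      intro w _
      simp [ha, Bool.and_comm]
    · rw [if_neg ha, ih]
      apply List.filter_congr
      intro w _
      simp [ha]

-- for a same-length word, B's per-position test over enumerate cs equals A's zip test
lemma pvEnumZip (cs w : List Char) (hl : w.length = cs.length) :
    ((PySem.List.enumerate cs).all (fun p =>
        !PySem.Chars.isalpha p.2 || (PySem.List.pyGet? w p.1 == some p.2)))
    = ((w.zip cs).all (fun p => !PySem.Chars.isalpha p.2 || p.1 == p.2)) := by
  rcases hb : (w.zip cs).all (fun p => !PySem.Chars.isalpha p.2 || p.1 == p.2) with _ | _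
  · rw [List.all_eq_false] at hb
    obtain ⟨q, hq, hqf⟩ := hb
    rw [List.mem_iff_getElem] at hq
    obtain ⟨k, hk, hqk⟩ := hq
    have hkw : k < w.length := by have := hk; rw [List.length_zip] at this; omega
    have hkc : k < cs.length := by omega
    apply List.all_eq_false.mpr
    refine ⟨((k : Int), cs[k]), ?_, ?_⟩
    · rw [List.mem_iff_getElem]
      exact ⟨k, by rw [PySem.List.length_enumerate]; omega, by simp [PySem.List.getElem_enumerate]⟩
    · have hget : PySem.List.pyGet? w ((k : Int)) = some w[k] := by
        rw [PySem.List.pyGet?_natCast]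
        exact List.getElem?_eq_getElem hkw
      rw [← hqk, List.getElem_zip] at hqf
      simp only [hget]
      simpa using hqf
  · rw [List.all_eq_true] at hb ⊢
    intro p hp
    rw [PySem.List.mem_enumerate_iff] at hp
    obtain ⟨k, hk, hpk⟩ := hp
    subst hpk
    simp only [zero_add]
    have hkw : k < w.length := by omega
    have hget : PySem.List.pyGet? w ((k : Int)) = some w[k] := by
      rw [PySem.List.pyGet?_natCast]
      exact List.getElem?_eq_getElem hkw
    have hz : k < (w.zip cs).length := by rw [List.length_zip]; omega
    have := hb ((w.zip cs)[k]) (List.getElem_mem hz)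
    rw [List.getElem_zip] at this
    simp only [hget]
    simpa using this

-- ===== VERDICT (by name: the statement is the Claim_ definition above) =====
theorem possible_passwords_spec : Claim_equal_possible_passwords := by
  intro corrupted possible _
  unfold Spec_possible_passwords possible_passwords possible_passwords_alt
  rw [pvMain corrupted.toList possible [], pvSieve, List.filter_filter]
  simp only [List.nil_append]
  apply List.filter_congr
  intro w _
  rcases hlen : (w.toList.length == corrupted.toList.length) with _ | _
  · simp [Bool.false_and]
  · have hl : w.toList.length = corrupted.toList.length := beq_iff_eq.mp hlen
    rw [pvEnumZip corrupted.toList w.toList hl]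
    simp [Bool.and_comm]
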